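-- pv_equiv track=rewrite | github.com/YagoRizzetti/AlgoritmosYEstructurasDeDatos1 | PrimerCuatrimestre/SegundoParcial/practica2p2.py | controle
-- ===== SOURCE A (Python) =====
-- def controle(x):
--     tienee = False
--     countl = 0
--     countpce = 0
--     for i in x:
--         if i == " " or i == ".":
--             if countl < 4 and tienee:
--                 countpce += 1
--             tienee = False
--             countl = 0
--         else:
--             countl += 1
--             if i == "e":
--                 tienee = True
--     return countpce
-- ===== SOURCE B (Python) =====
-- def controle(x):
--     normalized = "".join(" " if c == "." else c for c in x)
--     words = normalized.split(" ")
--     return sum(1 for w in words[:-1] if len(w) < 4 and "e" in w)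
-- ===== Notes on version B (the rewrite author's own statement) =====
-- stated objective: idiomatic
-- what changed: Replaced A's per-character state machine (the tienee/countl flags) by a tokenize-then-filter pipeline: normalize periods to spaces, split into words, and count the delimiter-terminated words (all but the last split piece) whose length is below 4 and which contain the letter e.
import Mathlib
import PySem

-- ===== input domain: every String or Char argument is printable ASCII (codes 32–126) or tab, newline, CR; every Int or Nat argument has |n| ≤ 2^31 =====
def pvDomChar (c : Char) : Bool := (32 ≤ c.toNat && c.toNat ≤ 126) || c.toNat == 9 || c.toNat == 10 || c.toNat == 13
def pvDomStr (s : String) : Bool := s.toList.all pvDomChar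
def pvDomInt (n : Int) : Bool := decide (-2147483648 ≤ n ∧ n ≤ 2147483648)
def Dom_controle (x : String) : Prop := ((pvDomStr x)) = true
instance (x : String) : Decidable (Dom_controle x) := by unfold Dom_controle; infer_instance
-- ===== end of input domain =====

-- B tokenizes the string (normalize periods to spaces, split into words, filter) instead of A's per-character state machine; objective: idiomatic.


-- ===== PORT A =====
-- the loop body: state (tienee, countl, countpce)
def controleStep (st : Bool × Int × Int) (i : Char) : Bool × Int × Int :=
  let (tienee, countl, countpce) := st
  if i == ' ' || i == '.' then
    let countpce := if countl < 4 && tienee then countpce + 1 else countpce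
    (false, 0, countpce)
  else
    ((tienee || i == 'e'), countl + 1, countpce)

def controle (x : String) : Int :=
  (x.toList.foldl controleStep (false, 0, 0)).2.2

-- ===== PORT B =====
def controle_alt (x : String) : Int :=
  let normalized := x.toList.map (fun c => if c == '.' then ' ' else c)
  let words := PySem.Chars.splitOn normalized [' ']
  ((PySem.List.slice words none (some (-1))).countP
    (fun w => decide (w.length < 4) && PySem.Chars.isIn ['e'] w) : Int)

-- ===== PRECONDITION & SPEC =====
def Spec_controle (x : String) (out : Int) : Prop := out = controle_alt x
instance (x : String) (out : Int) : Decidable (Spec_controle x out) := by unfold Spec_controle; infer_instance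

-- ===== CLAIM (what is proved, stated in full; the proofs are below) =====
def Claim_equal_controle : Prop := ∀ (x : String), Dom_controle x → Spec_controle x (controle x)

-- ===== LEMMAS AND PROOFS =====

theorem modifyHead_idfun {α : Type} (l : List α) : l.modifyHead (fun v => v) = l := by
  cases l <;> rfl

-- the count A's machine still produces from state (te, cl) on the remaining characters
def gCount : List Char → Bool → Int → Int
  | [], _, _ => 0
  | c :: cs, te, cl =>
      if c == ' ' || c == '.' then
        (if cl < 4 && te then 1 else 0) + gCount cs false 0
      else gCount cs (te || c == 'e') (cl + 1)

theorem foldl_controleStep (cs : List Char) (te : Bool) (cl acc : Int) :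
    (cs.foldl controleStep (te, cl, acc)).2.2 = acc + gCount cs te cl := by
  induction cs generalizing te cl acc with
  | nil => simp [gCount]
  | cons c cs ih =>
      simp only [List.foldl_cons, controleStep, gCount]
      by_cases h : (c == ' ' || c == '.') = true
      · simp only [h, if_true]
        by_cases h2 : (cl < 4 && te) = true
        · simp only [h2, if_true, ih]; ring
        · simp only [h2, Bool.false_eq_true, if_false, ih]; ring
      · simp only [Bool.not_eq_true] at h
        simp [h, ih]

-- clean structural single-character split (never returns [])
def splitChar (d : Char) : List Char → List (List Char)
  | [] => [[]]
  | c :: cs => if c == d then [] :: splitChar d cs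
               else (splitChar d cs).modifyHead (fun w => c :: w)

theorem splitChar_ne_nil (d : Char) (l : List Char) : splitChar d l ≠ [] := by
  cases l with
  | nil => simp [splitChar]
  | cons c cs =>
      simp only [splitChar]
      split
      · simp
      · cases h : splitChar d cs with
        | nil => exact absurd h (splitChar_ne_nil d cs)
        | cons w ws => simp [List.modifyHead]

theorem splitOn_go_eq (d : Char) (l cur : List Char) (acc : List (List Char))
    (fuel : Nat) (hf : l.length ≤ fuel) :
    PySem.Chars.splitOn.go [d] fuel l cur acc
      = acc.reverse ++ (splitChar d l).modifyHead (fun w => cur.reverse ++ w) := by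
  induction fuel generalizing l cur acc with
  | zero =>
      have hl : l = [] := List.length_eq_zero_iff.mp (Nat.le_zero.mp hf)
      subst hl
      simp [PySem.Chars.splitOn.go, splitChar, List.modifyHead]
  | succ fuel ih =>
      cases l with
      | nil => simp [PySem.Chars.splitOn.go, splitChar, List.modifyHead]
      | cons c rest =>
          simp only [List.length_cons, Nat.succ_le_succ_iff] at hf
          rw [PySem.Chars.splitOn.go]
          by_cases h : c = d
          · have hp : [d].isPrefixOf (c :: rest) = true := by simp [List.isPrefixOf, h]
            have hsc : splitChar d (c :: rest) = [] :: splitChar d rest := by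
              simp [splitChar, h]
            simp only [hp, if_true, List.length_cons, List.length_nil, List.drop_succ_cons,
              List.drop_zero]
            rw [ih rest [] (cur.reverse :: acc) hf, hsc]
            cases hr : splitChar d rest with
            | nil => exact absurd hr (splitChar_ne_nil d rest)
            | cons v vs => simp [List.modifyHead]
          · have hp : [d].isPrefixOf (c :: rest) = false := by
              simp [List.isPrefixOf]; exact fun hdc => absurd hdc.symm h
            simp only [hp, Bool.false_eq_true, if_false]
            rw [ih rest (c :: cur) acc hf]
            have hsc : splitChar d (c :: rest) = (splitChar d rest).modifyHead (fun w => c :: w) := by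
              simp [splitChar, h]
            rw [hsc]
            cases hr : splitChar d rest with
            | nil => exact absurd hr (splitChar_ne_nil d rest)
            | cons w ws => simp [List.modifyHead]

theorem splitOn_eq_splitChar (d : Char) (l : List Char) :
    PySem.Chars.splitOn l [d] = splitChar d l := by
  rw [PySem.Chars.splitOn, splitOn_go_eq d l [] [] (l.length + 1) (by omega)]
  simp only [List.reverse_nil, List.nil_append, modifyHead_idfun]

theorem isIn_singleton_iff (c : Char) (w : List Char) :
    PySem.Chars.isIn [c] w = true ↔ c ∈ w := by
  rw [PySem.Chars.isIn_iff_infix]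
  constructor
  · rintro ⟨s, t, h⟩; subst h; simp
  · intro h
    obtain ⟨s, t, h⟩ := List.append_of_mem h
    exact ⟨s, t, by simp [h]⟩

def pWord (w : List Char) : Bool := decide (w.length < 4) && PySem.Chars.isIn ['e'] w

theorem pWord_eq (w : List Char) :
    pWord w = ((w.length : Int) < 4 && decide ('e' ∈ w)) := by
  have h1 : decide (w.length < 4) = decide ((w.length : Int) < 4) := by
    rw [decide_eq_decide]; omega
  have h2 : PySem.Chars.isIn ['e'] w = decide ('e' ∈ w) := by
    by_cases h : 'e' ∈ w
    · simp [h, (isIn_singleton_iff 'e' w).2 h]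
    · rw [decide_eq_false h, Bool.eq_false_iff]
      exact fun hh => h ((isIn_singleton_iff 'e' w).1 hh)
  rw [pWord, h1, h2]

-- B's count over delimiter-terminated words, with pending word w, equals A's remaining count
theorem countP_splitChar (l w : List Char) (hdot : '.' ∉ l) :
    (((splitChar ' ' l).modifyHead (fun v => w ++ v)).dropLast.countP pWord : Int)
      = gCount l (decide ('e' ∈ w)) (w.length : Int) := by
  induction l generalizing w with
  | nil => simp [splitChar, List.modifyHead, gCount]
  | cons c cs ih =>
      by_cases h : c = ' '
      · subst h
        have hsc : splitChar ' ' (' ' :: cs) = [] :: splitChar ' ' cs := by simp [splitChar]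
        rw [hsc]
        simp only [List.modifyHead, List.append_nil]
        rw [List.dropLast_cons_of_ne_nil (splitChar_ne_nil ' ' cs)]
        have hih := ih ([] : List Char) (fun hm => hdot (List.mem_cons_of_mem _ hm))
        simp only [List.nil_append, List.length_nil, Nat.cast_zero, List.not_mem_nil,
          decide_false, modifyHead_idfun] at hih
        have hg : gCount (' ' :: cs) (decide ('e' ∈ w)) (w.length : Int)
            = (if (w.length : Int) < 4 && decide ('e' ∈ w) then 1 else 0) + gCount cs false 0 := by
          simp [gCount]
        rw [hg, ← hih, List.countP_cons, Nat.cast_add,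
          apply_ite (fun n : Nat => (n : Int)), pWord_eq]
        simp only [Nat.cast_one, Nat.cast_zero]
        exact add_comm _ _
      · have hsc : splitChar ' ' (c :: cs) = (splitChar ' ' cs).modifyHead (fun v => c :: v) := by
          simp [splitChar, h]
        rw [hsc]
        have hmod : ((splitChar ' ' cs).modifyHead (fun v => c :: v)).modifyHead (fun v => w ++ v)
            = (splitChar ' ' cs).modifyHead (fun v => (w ++ [c]) ++ v) := by
          cases splitChar ' ' cs <;> simp [List.modifyHead]
        rw [hmod, ih (w ++ [c]) (fun hm => hdot (List.mem_cons_of_mem _ hm))]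
        have hc : (c == ' ' || c == '.') = false := by
          simp only [Bool.or_eq_false_iff, beq_eq_false_iff_ne]
          exact ⟨h, fun h2 => hdot (h2 ▸ List.mem_cons_self)⟩
        have hg : gCount (c :: cs) (decide ('e' ∈ w)) (w.length : Int)
            = gCount cs (decide ('e' ∈ w) || c == 'e') ((w.length : Int) + 1) := by
          simp [gCount, hc]
        rw [hg]
        congr 1
        · have h1 : (c == 'e') = decide (c = 'e') := by
            by_cases hce : c = 'e' <;> simp [hce]
          rw [h1, ← Bool.decide_or, decide_eq_decide]
          simp only [List.mem_append, List.mem_singleton]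
          exact or_congr_right eq_comm
        · push_cast [List.length_append, List.length_singleton]; ring

theorem gCount_cons_space (l : List Char) (te : Bool) (cl : Int) :
    gCount (' ' :: l) te cl = (if cl < 4 && te then 1 else 0) + gCount l false 0 := rfl

theorem gCount_cons_dot (l : List Char) (te : Bool) (cl : Int) :
    gCount ('.' :: l) te cl = (if cl < 4 && te then 1 else 0) + gCount l false 0 := rfl

-- normalizing '.' to ' ' does not change A's count
theorem gCount_map_norm (cs : List Char) (te : Bool) (cl : Int) :
    gCount (cs.map (fun c => if c == '.' then ' ' else c)) te cl = gCount cs te cl := by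
  induction cs generalizing te cl with
  | nil => rfl
  | cons c cs ih =>
      by_cases h : c = '.'
      · subst h
        have hm : (if (('.' : Char) == '.') = true then ' ' else ('.' : Char)) = ' ' := rfl
        simp only [List.map_cons, hm, gCount_cons_space, gCount_cons_dot, ih]
      · have hm : (if (c == '.') = true then ' ' else c) = c := by simp [h]
        by_cases h2 : c = ' '
        · subst h2
          simp only [List.map_cons, hm, gCount_cons_space, ih]
        · have hc : (c == ' ' || c == '.') = false := by simp [h, h2]
          simp only [List.map_cons, hm, gCount, hc, Bool.false_eq_true, if_false, ih]

theorem dot_notMem_norm (cs : List Char) :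
    '.' ∉ cs.map (fun c => if c == '.' then ' ' else c) := by
  intro hm
  obtain ⟨c, _, hc⟩ := List.mem_map.mp hm
  by_cases h : c = '.' <;> simp [h] at hc

-- ===== VERDICT (by name: the statement is the Claim_ definition above) =====
theorem controle_spec : Claim_equal_controle := by
  intro x _
  unfold Spec_controle controle controle_alt
  simp only [PySem.List.slice_to_neg_one]
  rw [foldl_controleStep, zero_add, splitOn_eq_splitChar]
  have h := countP_splitChar (x.toList.map (fun c => if c == '.' then ' ' else c)) []
    (dot_notMem_norm x.toList)
  simp only [List.nil_append, List.not_mem_nil, decide_false, List.length_nil, Nat.cast_zero,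
    modifyHead_idfun] at h
  rw [← gCount_map_norm x.toList false 0, ← h]
  rfl
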